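-- pv_equiv track=rewrite | github.com/Ben-coder1/CMOR-438 | src/ml/metrics.py | ascii_word_dist
-- ===== SOURCE A (Python) =====
-- def ascii_word_dist(str1: str, str2: str) -> int:
--     """
--     Computes the distance between two strings by summing the absolute differences
--     in ASCII values at each character position. If one string is shorter, missing
--     characters are treated as having ASCII value 0.
--
--     Parameters:
--         str1 (str): First string.
--         str2 (str): Second string.
--
--     Returns:
--         int: Total ASCII difference across all positions.
--
--     Raises:
--         TypeError: If either input is not a string.
--     """
--     if not isinstance(str1, str) or not isinstance(str2, str):
--         raise TypeError("Both inputs must be strings.")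
--
--     max_len = max(len(str1), len(str2))
--     total = 0
--     for i in range(max_len):
--         c1 = ord(str1[i]) if i < len(str1) else 0
--         c2 = ord(str2[i]) if i < len(str2) else 0
--         total += abs(c1 - c2)
--
--     return total
-- ===== SOURCE B (Python) =====
-- def ascii_word_dist(str1: str, str2: str) -> int:
--     if not isinstance(str1, str) or not isinstance(str2, str):
--         raise TypeError("Both inputs must be strings.")
--
--     common = min(len(str1), len(str2))
--     total = sum(abs(ord(c1) - ord(c2)) for c1, c2 in zip(str1, str2))
--     longer = str1 if len(str1) > len(str2) else str2
--     total += sum(ord(c) for c in longer[common:])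
--     return total
-- ===== Notes on version B (the rewrite author's own statement) =====
-- stated objective: simpler
-- what changed: Replaces A's single index loop over range(max_len) with two guarded lookups per position by two unconditional passes: a zip over the common prefix and a plain sum of ASCII codes over the longer string's suffix.
import Mathlib
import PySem

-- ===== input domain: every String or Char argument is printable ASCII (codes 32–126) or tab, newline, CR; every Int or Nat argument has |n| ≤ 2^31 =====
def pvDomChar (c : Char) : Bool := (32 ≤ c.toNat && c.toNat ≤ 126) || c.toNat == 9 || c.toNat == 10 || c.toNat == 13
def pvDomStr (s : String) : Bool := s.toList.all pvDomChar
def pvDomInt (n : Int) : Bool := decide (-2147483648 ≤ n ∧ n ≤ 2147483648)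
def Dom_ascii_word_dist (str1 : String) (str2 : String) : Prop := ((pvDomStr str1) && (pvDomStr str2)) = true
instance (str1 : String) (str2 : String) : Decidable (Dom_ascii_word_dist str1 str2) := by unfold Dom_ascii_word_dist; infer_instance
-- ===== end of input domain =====

-- B replaces A's single guarded index loop over range(max_len) by two unconditional passes:
-- a zip pass over the common prefix and a plain ASCII sum over the longer string's suffix
-- (objective: simpler; return value only — neither version mutates its arguments).

-- ===== PORT A =====
-- One loop over range(max_len); each position reads a guarded index from each string.
def ascii_word_dist (str1 : String) (str2 : String) : Int :=
  let l1 := str1.toList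
  let l2 := str2.toList
  let maxLen : Int := max (PySem.List.len l1) (PySem.List.len l2)
  (PySem.List.pyRange 0 maxLen 1).foldl (fun total i =>
    let c1 : Int := if i < PySem.List.len l1 then ((PySem.List.pyGetD l1 i ' ').toNat : Int) else 0
    let c2 : Int := if i < PySem.List.len l2 then ((PySem.List.pyGetD l2 i ' ').toNat : Int) else 0
    total + |c1 - c2|) 0

-- ===== PORT B =====
-- zip pass over the common prefix, then the bare codes of the longer string's suffix;
-- longer[common:] with common = min(len1,len2) ≥ 0 is List.drop common.
def ascii_word_dist_alt (str1 : String) (str2 : String) : Int :=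
  let l1 := str1.toList
  let l2 := str2.toList
  let common := min l1.length l2.length
  let total := ((List.zip l1 l2).map (fun p => |(p.1.toNat : Int) - (p.2.toNat : Int)|)).sum
  let longer := if l2.length < l1.length then l1 else l2
  total + ((longer.drop common).map (fun c => (c.toNat : Int))).sum

-- ===== PRECONDITION & SPEC =====
def Spec_ascii_word_dist (str1 : String) (str2 : String) (out : Int) : Prop := out = ascii_word_dist_alt str1 str2
instance (str1 : String) (str2 : String) (out : Int) : Decidable (Spec_ascii_word_dist str1 str2 out) := by unfold Spec_ascii_word_dist; infer_instance

-- ===== CLAIM (what is proved, stated in full; the proofs are below) =====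
def Claim_equal_ascii_word_dist : Prop := ∀ (str1 : String) (str2 : String), Dom_ascii_word_dist str1 str2 → Spec_ascii_word_dist str1 str2 (ascii_word_dist str1 str2)

-- ===== LEMMAS AND PROOFS =====

-- the character code A reads at position i (0 past the end), as a function of a Nat index
def pvOrdAt (l : List Char) (i : Nat) : Int :=
  if i < l.length then ((l.getD i ' ').toNat : Int) else 0

theorem pvOrdAt_nil (i : Nat) : pvOrdAt [] i = 0 := by simp [pvOrdAt]

theorem pvOrdAt_zero (a : Char) (l : List Char) : pvOrdAt (a :: l) 0 = (a.toNat : Int) := by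
  simp [pvOrdAt]

theorem pvOrdAt_succ (a : Char) (l : List Char) (i : Nat) :
    pvOrdAt (a :: l) (i + 1) = pvOrdAt l i := by
  simp [pvOrdAt]

theorem pvOrdAt_nonneg (l : List Char) (i : Nat) : 0 ≤ pvOrdAt l i := by
  unfold pvOrdAt; split <;> simp

-- A's fold, rewritten as a sum over the natural indices below max_len
theorem pvA_eq_sum (l1 l2 : List Char) :
    (PySem.List.pyRange 0 (max (PySem.List.len l1) (PySem.List.len l2)) 1).foldl (fun total i =>
      let c1 : Int := if i < PySem.List.len l1 then ((PySem.List.pyGetD l1 i ' ').toNat : Int) else 0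
      let c2 : Int := if i < PySem.List.len l2 then ((PySem.List.pyGetD l2 i ' ').toNat : Int) else 0
      total + |c1 - c2|) 0
    = ((List.range (max l1.length l2.length)).map (fun i => |pvOrdAt l1 i - pvOrdAt l2 i|)).sum := by
  have hmax : max (PySem.List.len l1) (PySem.List.len l2)
      = ((max l1.length l2.length : Nat) : Int) := by
    simp [PySem.List.len_eq, Nat.cast_max]
  rw [hmax, PySem.List.pyRange_zero_natCast]
  rw [List.foldl_map]
  rw [PySem.List.foldl_add]
  simp only [zero_add]
  congr 1
  apply List.map_congr_left
  intro i hi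
  simp only [List.mem_range] at hi
  simp [pvOrdAt, PySem.List.len_eq, Nat.cast_lt]

-- a one-sided sum: summing |code - 0| over all positions of l is summing its codes
theorem pvSum_single (l : List Char) :
    ((List.range l.length).map (fun i => pvOrdAt l i)).sum
      = (l.map (fun c => (c.toNat : Int))).sum := by
  induction l with
  | nil => simp
  | cons a t ih =>
      rw [List.length_cons, List.range_succ_eq_map]
      simp only [List.map_cons, List.map_map, List.sum_cons, pvOrdAt_zero]
      have : (List.range t.length).map ((fun i => pvOrdAt (a :: t) i) ∘ (· + 1))
          = (List.range t.length).map (fun i => pvOrdAt t i) := by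
        apply List.map_congr_left; intro i _; simp [Function.comp, pvOrdAt_succ]
      rw [this, ih]

-- core equivalence on char lists
theorem pvKey (l1 l2 : List Char) :
    ((List.range (max l1.length l2.length)).map (fun i => |pvOrdAt l1 i - pvOrdAt l2 i|)).sum
    = ((List.zip l1 l2).map (fun p => |(p.1.toNat : Int) - (p.2.toNat : Int)|)).sum
      + (((if l2.length < l1.length then l1 else l2).drop (min l1.length l2.length)).map
          (fun c => (c.toNat : Int))).sum := by
  induction l1 generalizing l2 with
  | nil =>
      have h : ∀ i, |pvOrdAt ([] : List Char) i - pvOrdAt l2 i| = pvOrdAt l2 i := by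
        intro i; rw [pvOrdAt_nil, zero_sub, abs_neg, abs_of_nonneg (pvOrdAt_nonneg l2 i)]
      simp only [List.length_nil, List.zip_nil_left, List.map_nil, List.sum_nil, zero_add,
        Nat.max_eq_right (Nat.zero_le _), Nat.min_eq_left (Nat.zero_le _)]
      rw [if_neg (Nat.not_lt_zero _), List.drop_zero]
      rw [List.map_congr_left (fun i _ => h i)]
      exact pvSum_single l2
  | cons a t1 ih =>
      cases l2 with
      | nil =>
          have h : ∀ i, |pvOrdAt (a :: t1) i - pvOrdAt ([] : List Char) i|
              = pvOrdAt (a :: t1) i := by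
            intro i; rw [pvOrdAt_nil, sub_zero, abs_of_nonneg (pvOrdAt_nonneg _ i)]
          simp only [List.length_nil, List.zip_nil_right, List.map_nil, List.sum_nil, zero_add, Nat.max_eq_left (Nat.zero_le _), List.length_cons,
            Nat.min_eq_right (Nat.zero_le _)]
          rw [if_pos (Nat.succ_pos _), List.drop_zero]
          rw [List.map_congr_left (fun i _ => h i)]
          exact pvSum_single (a :: t1)
      | cons b t2 =>
          rw [List.length_cons, List.length_cons]
          have hmax : max (t1.length + 1) (t2.length + 1) = max t1.length t2.length + 1 := by
            omega
          rw [hmax, List.range_succ_eq_map]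
          simp only [List.map_cons, List.sum_cons, List.map_map, pvOrdAt_zero]
          have hsh : (List.range (max t1.length t2.length)).map
              ((fun i => |pvOrdAt (a :: t1) i - pvOrdAt (b :: t2) i|) ∘ (· + 1))
              = (List.range (max t1.length t2.length)).map
                (fun i => |pvOrdAt t1 i - pvOrdAt t2 i|) := by
            apply List.map_congr_left; intro i _
            simp [Function.comp, pvOrdAt_succ]
          rw [hsh, ih t2]
          have hmin : min (t1.length + 1) (t2.length + 1) = min t1.length t2.length + 1 := by
            omega
          by_cases hc : t2.length < t1.length
          · simp only [List.zip_cons_cons, List.map_cons, List.sum_cons, hmin,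
              if_pos (Nat.add_lt_add_right hc 1), if_pos hc, List.drop_succ_cons]
            ring
          · have hc' : ¬ t2.length + 1 < t1.length + 1 := by omega
            simp only [List.zip_cons_cons, List.map_cons, List.sum_cons, hmin,
              if_neg hc', if_neg hc, List.drop_succ_cons]
            ring

-- ===== VERDICT (by name: the statement is the Claim_ definition above) =====
theorem ascii_word_dist_spec : Claim_equal_ascii_word_dist := by
  intro str1 str2 _
  unfold Spec_ascii_word_dist ascii_word_dist ascii_word_dist_alt
  rw [pvA_eq_sum, pvKey]
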